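-- pv_equiv track=rewrite | github.com/pstoeber/nba-stats-predictor | Pipeline Development/prediction_script.py | create_stat_dicts
-- ===== SOURCE A (Python) =====
-- def create_stat_dicts(loop_iterations, table_names, name, stat_dict):
--
--     table = []
--     for row in loop_iterations[0]:
--         table.append(row)
--     stat_dict[table_names[0]] = table
--
--     if len(loop_iterations) > 1:
--         return create_stat_dicts(loop_iterations[1:], table_names[1:], name, stat_dict)
--     else:
--          return stat_dict
-- ===== SOURCE B (Python) =====
-- def create_stat_dicts(loop_iterations, table_names, name, stat_dict):
--     for i in range(len(loop_iterations)):
--         stat_dict[table_names[i]] = list(loop_iterations[i])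
--     return stat_dict
-- ===== Notes on version B (the rewrite author's own statement) =====
-- stated objective: simpler
-- what changed: Replaces A's tail recursion over repeatedly sliced lists with a single flat indexed loop over loop_iterations, dropping the per-step list slicing and the manual row-copy loop.
import Mathlib
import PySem

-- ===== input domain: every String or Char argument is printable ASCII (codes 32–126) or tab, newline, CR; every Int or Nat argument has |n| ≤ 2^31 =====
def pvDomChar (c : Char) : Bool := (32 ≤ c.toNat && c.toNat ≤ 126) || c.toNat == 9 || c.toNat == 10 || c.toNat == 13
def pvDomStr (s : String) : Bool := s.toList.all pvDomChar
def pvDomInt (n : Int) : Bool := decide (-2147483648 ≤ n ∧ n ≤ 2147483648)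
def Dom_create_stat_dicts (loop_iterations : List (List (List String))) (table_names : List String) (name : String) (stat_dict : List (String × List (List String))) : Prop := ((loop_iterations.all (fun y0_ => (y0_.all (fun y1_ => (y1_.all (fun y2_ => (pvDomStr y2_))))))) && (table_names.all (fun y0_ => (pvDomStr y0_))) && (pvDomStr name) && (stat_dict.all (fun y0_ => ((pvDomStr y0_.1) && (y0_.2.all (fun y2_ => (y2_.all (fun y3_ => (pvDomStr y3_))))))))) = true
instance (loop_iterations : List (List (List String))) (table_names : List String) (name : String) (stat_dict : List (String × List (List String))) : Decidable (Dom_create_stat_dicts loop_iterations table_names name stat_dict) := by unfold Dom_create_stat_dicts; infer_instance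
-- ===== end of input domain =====

-- ===== PORT A =====
-- B replaces A's tail recursion over sliced lists with one flat indexed loop (simpler);
-- A mutates the stat_dict argument in place in Python — the equivalence proved here is about the return value only.
def create_stat_dicts (loop_iterations : List (List (List String))) (table_names : List String) (name : String) (stat_dict : List (String × List (List String))) : List (String × List (List String)) :=
  match loop_iterations, table_names with
  | row0 :: rest, t0 :: trest =>
      -- table = []; for row in loop_iterations[0]: table.append(row)
      let table := row0.foldl (fun acc row => acc ++ [row]) []
      -- stat_dict[table_names[0]] = table
      let stat_dict' := (PySem.Dict.insert (PySem.Dict.mk stat_dict) t0 table).items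
      -- if len(loop_iterations) > 1: recurse on loop_iterations[1:], table_names[1:]
      if rest.length > 0 then create_stat_dicts rest trest name stat_dict'
      else stat_dict'
  | _, _ => stat_dict   -- Python raises IndexError here; excluded by Pre_

-- ===== PORT B =====
def create_stat_dicts_alt (loop_iterations : List (List (List String))) (table_names : List String) (name : String) (stat_dict : List (String × List (List String))) : List (String × List (List String)) :=
  -- for i in range(len(loop_iterations)): stat_dict[table_names[i]] = list(loop_iterations[i])
  (List.range loop_iterations.length).foldl
    (fun d (i : Nat) =>
      match PySem.List.pyGet? table_names (i : Int), PySem.List.pyGet? loop_iterations (i : Int) with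
      | some t, some r => (PySem.Dict.insert (PySem.Dict.mk d) t r).items
      | _, _ => d)   -- IndexError in Python; excluded by Pre_
    stat_dict

-- ===== PRECONDITION & SPEC =====
-- Pre_ admits exactly the inputs on which Python A returns: loop_iterations nonempty
-- (A unconditionally indexes loop_iterations[0]) and table_names at least as long
-- (otherwise table_names[0] raises IndexError at some recursive step).
def Pre_create_stat_dicts (loop_iterations : List (List (List String))) (table_names : List String) (name : String) (stat_dict : List (String × List (List String))) : Prop :=
  loop_iterations ≠ [] ∧ loop_iterations.length ≤ table_names.length
instance (loop_iterations : List (List (List String))) (table_names : List String) (name : String) (stat_dict : List (String × List (List String))) : Decidable (Pre_create_stat_dicts loop_iterations table_names name stat_dict) := by unfold Pre_create_stat_dicts; infer_instance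
def pvWitness_create_stat_dicts : List (List (List String)) × List String × String × (List (String × List (List String))) :=
  ([[["a", "b"], ["c"]]], ["t1"], "n", [("old", [["z"]])])


def Spec_create_stat_dicts (loop_iterations : List (List (List String))) (table_names : List String) (name : String) (stat_dict : List (String × List (List String))) (out : List (String × List (List String))) : Prop := out = create_stat_dicts_alt loop_iterations table_names name stat_dict
instance (loop_iterations : List (List (List String))) (table_names : List String) (name : String) (stat_dict : List (String × List (List String))) (out : List (String × List (List String))) : Decidable (Spec_create_stat_dicts loop_iterations table_names name stat_dict out) := by unfold Spec_create_stat_dicts; infer_instance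

-- ===== CLAIM (what is proved, stated in full; the proofs are below) =====
def Claim_equal_create_stat_dicts : Prop := ∀ (loop_iterations : List (List (List String))) (table_names : List String) (name : String) (stat_dict : List (String × List (List String))), Dom_create_stat_dicts loop_iterations table_names name stat_dict → Pre_create_stat_dicts loop_iterations table_names name stat_dict → Spec_create_stat_dicts loop_iterations table_names name stat_dict (create_stat_dicts loop_iterations table_names name stat_dict)

-- ===== LEMMAS AND PROOFS =====

lemma foldl_append_id (r : List (List String)) (acc : List (List String)) :
    r.foldl (fun a x => a ++ [x]) acc = acc ++ r := by
  induction r generalizing acc with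
  | nil => simp
  | cons x xs ih => simp [List.foldl, ih]

lemma alt_cons (r : List (List String)) (rest : List (List (List String)))
    (t : String) (trest : List String) (name : String)
    (sd : List (String × List (List String))) :
    create_stat_dicts_alt (r :: rest) (t :: trest) name sd =
      create_stat_dicts_alt rest trest name ((PySem.Dict.insert (PySem.Dict.mk sd) t r).items) := by
  unfold create_stat_dicts_alt
  rw [List.length_cons, List.range_succ_eq_map, List.foldl_cons, List.foldl_map]
  simp

lemma alt_nil (tn : List String) (name : String) (sd : List (String × List (List String))) :
    create_stat_dicts_alt [] tn name sd = sd := by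
  simp [create_stat_dicts_alt]

lemma main_eq (li : List (List (List String))) (tn : List String) (name : String)
    (sd : List (String × List (List String)))
    (hne : li ≠ []) (hlen : li.length ≤ tn.length) :
    create_stat_dicts li tn name sd = create_stat_dicts_alt li tn name sd := by
  induction li generalizing tn sd with
  | nil => exact absurd rfl hne
  | cons r rest ih =>
    match tn with
    | [] => simp at hlen
    | t :: trest =>
      rw [alt_cons]
      unfold create_stat_dicts
      rw [foldl_append_id]
      simp only [List.nil_append]
      by_cases h : rest = []
      · subst h; simp [alt_nil]
      · have : rest.length > 0 := List.length_pos_iff.mpr h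
        simp only [this, if_pos]
        exact ih trest _ h (by simpa using Nat.le_of_succ_le_succ hlen)

-- ===== VERDICT (by name: the statement is the Claim_ definition above) =====

-- ===== VERDICT (by name: the statement is the Claim_ definition above) =====
theorem create_stat_dicts_spec : Claim_equal_create_stat_dicts := by
  intro li tn name sd _ hpre
  unfold Spec_create_stat_dicts
  exact main_eq li tn name sd hpre.1 hpre.2
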